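-- pv_equiv track=rewrite | github.com/GBbartosz/Chinese_stock_market | preparedata0.py | compability_price_and_docs_dates
-- ===== SOURCE A (Python) =====
-- def compability_price_and_docs_dates(dates_lists):
--     min_dates_list = []
--     max_dates_list = []
--     successes = []
--     for dates_list in dates_lists:
--         min_dates_list.append(min(dates_list))
--         max_dates_list.append(max(dates_list))
--     for min_date in min_dates_list:
--         for max_date in max_dates_list:
--             if min_date < max_date:
--                 successes.append(True)
--             else:
--                 successes.append(False)
--     if False in successes:
--         success = False
--     else:
--         success = True
--     return success
-- ===== SOURCE B (Python) =====
-- def compability_price_and_docs_dates(dates_lists):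
--     overall_max_min = None
--     overall_min_max = None
--     for dates_list in dates_lists:
--         lo = min(dates_list)
--         hi = max(dates_list)
--         if overall_max_min is None:
--             overall_max_min = lo
--             overall_min_max = hi
--         else:
--             overall_max_min = max(overall_max_min, lo)
--             overall_min_max = min(overall_min_max, hi)
--     if overall_max_min is None:
--         return True
--     return overall_max_min < overall_min_max
-- ===== Notes on version B (the rewrite author's own statement) =====
-- stated objective: faster
-- what changed: Replaces A's materialised min/max lists plus O(n^2) nested pairwise comparison with one pass that maintains only the overall max-of-mins and min-of-maxes and compares them once.
import Mathlib
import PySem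

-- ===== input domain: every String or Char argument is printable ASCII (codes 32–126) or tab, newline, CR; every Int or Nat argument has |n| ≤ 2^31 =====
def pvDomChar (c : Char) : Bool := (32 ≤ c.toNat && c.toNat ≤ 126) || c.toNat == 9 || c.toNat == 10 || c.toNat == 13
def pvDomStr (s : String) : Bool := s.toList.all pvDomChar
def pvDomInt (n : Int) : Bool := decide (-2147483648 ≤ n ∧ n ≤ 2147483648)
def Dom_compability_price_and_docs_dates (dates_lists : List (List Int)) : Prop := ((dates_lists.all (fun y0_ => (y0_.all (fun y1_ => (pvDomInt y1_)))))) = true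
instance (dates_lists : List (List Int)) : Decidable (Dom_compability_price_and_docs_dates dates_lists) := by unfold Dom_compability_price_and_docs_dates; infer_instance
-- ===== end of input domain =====

-- B replaces A's min/max lists and O(n^2) nested pairwise comparison with a single pass
-- keeping only max-of-mins and min-of-maxes (objective: faster).

-- ===== PORT A =====
def compability_price_and_docs_dates (dates_lists : List (List Int)) : Bool :=
  let min_dates_list := dates_lists.foldl
    (fun acc dates_list => acc ++ [(PySem.List.min? dates_list (fun x => x)).getD 0]) []
  let max_dates_list := dates_lists.foldl
    (fun acc dates_list => acc ++ [(PySem.List.max? dates_list (fun x => x)).getD 0]) []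
  let successes := min_dates_list.foldl
    (fun acc min_date => max_dates_list.foldl
      (fun acc2 max_date => if min_date < max_date then acc2 ++ [true] else acc2 ++ [false]) acc) []
  if successes.contains false then false else true

-- ===== PORT B =====
-- one step of B's loop: fold this sublist's min/max into the running (max-of-mins, min-of-maxes)
def pvStep (st : Option (Int × Int)) (dates_list : List Int) : Option (Int × Int) :=
  let lo := (PySem.List.min? dates_list (fun x => x)).getD 0
  let hi := (PySem.List.max? dates_list (fun x => x)).getD 0
  match st with
  | none => some (lo, hi)
  | some (a, b) => some (max a lo, min b hi)

def compability_price_and_docs_dates_alt (dates_lists : List (List Int)) : Bool :=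
  let st := dates_lists.foldl pvStep none
  match st with
  | none => true
  | some (a, b) => decide (a < b)

-- ===== PRECONDITION & SPEC =====
-- Pre_ excludes inputs containing an empty sublist: Python's min()/max() raise ValueError there (in A and in B alike).
def Pre_compability_price_and_docs_dates (dates_lists : List (List Int)) : Prop :=
  ∀ l ∈ dates_lists, l ≠ []
instance (dates_lists : List (List Int)) : Decidable (Pre_compability_price_and_docs_dates dates_lists) := by unfold Pre_compability_price_and_docs_dates; infer_instance
def pvWitness_compability_price_and_docs_dates : List (List Int) := [[1, 2], [3]]

def Spec_compability_price_and_docs_dates (dates_lists : List (List Int)) (out : Bool) : Prop := out = compability_price_and_docs_dates_alt dates_lists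
instance (dates_lists : List (List Int)) (out : Bool) : Decidable (Spec_compability_price_and_docs_dates dates_lists out) := by unfold Spec_compability_price_and_docs_dates; infer_instance

-- ===== CLAIM (what is proved, stated in full; the proofs are below) =====
def Claim_equal_compability_price_and_docs_dates : Prop := ∀ (dates_lists : List (List Int)), Dom_compability_price_and_docs_dates dates_lists → Pre_compability_price_and_docs_dates dates_lists → Spec_compability_price_and_docs_dates dates_lists (compability_price_and_docs_dates dates_lists)

-- ===== LEMMAS AND PROOFS =====

-- the per-sublist min / max both ports compute
def pvMin (l : List Int) : Int := (PySem.List.min? l (fun x => x)).getD 0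
def pvMax (l : List Int) : Int := (PySem.List.max? l (fun x => x)).getD 0

-- B's fold, once started, computes the running max of mins and min of maxes
lemma altFold (rest : List (List Int)) (a b : Int) :
    rest.foldl pvStep (some (a, b))
    = some ((rest.map pvMin).foldl max a, (rest.map pvMax).foldl min b) := by
  induction rest generalizing a b with
  | nil => simp
  | cons l t ih => simp [ih, pvStep, pvMin, pvMax]

-- A's inner-loop branch is an append of the decided comparison
lemma branch_eq (mn mx : Int) (acc : List Bool) :
    (if mn < mx then acc ++ [true] else acc ++ [false]) = acc ++ [decide (mn < mx)] := by
  split_ifs with h <;> simp [h]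

-- the key order fact: all pairwise mn < mx  ↔  max of mins < min of maxes
lemma pairwise_iff (m0 M0 : Int) (ms Ms : List Int) :
    ((∀ mn ∈ m0 :: ms, ∀ mx ∈ M0 :: Ms, mn < mx) ↔
      ms.foldl max m0 < Ms.foldl min M0) := by
  constructor
  · intro h
    rcases PySem.List.foldl_max_mem ms m0 with hM | hM
    · rcases PySem.List.foldl_min_mem Ms M0 with hm | hm
      · rw [hM, hm]; exact h m0 (by simp) M0 (by simp)
      · rw [hM]; exact h m0 (by simp) _ (by simp [hm])
    · rcases PySem.List.foldl_min_mem Ms M0 with hm | hm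
      · rw [hm]; exact h _ (by simp [hM]) M0 (by simp)
      · exact h _ (by simp [hM]) _ (by simp [hm])
  · intro h mn hmn mx hmx
    have h1 : mn ≤ ms.foldl max m0 := by
      rcases List.mem_cons.1 hmn with rfl | hmn
      · exact (PySem.List.le_foldl_max ms mn).1
      · exact (PySem.List.le_foldl_max ms m0).2 mn hmn
    have h2 : Ms.foldl min M0 ≤ mx := by
      rcases List.mem_cons.1 hmx with rfl | hmx
      · exact (PySem.List.foldl_min_le Ms mx).1
      · exact (PySem.List.foldl_min_le Ms M0).2 mx hmx
    exact lt_of_le_of_lt h1 (lt_of_lt_of_le h h2)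

lemma altFold2 (l0 : List Int) (rest : List (List Int)) :
    (l0 :: rest).foldl pvStep none
    = some ((rest.map pvMin).foldl max (pvMin l0), (rest.map pvMax).foldl min (pvMax l0)) := by
  rw [List.foldl_cons]
  exact altFold rest (pvMin l0) (pvMax l0)

-- ===== VERDICT (by name: the statement is the Claim_ definition above) =====
theorem compability_price_and_docs_dates_spec : Claim_equal_compability_price_and_docs_dates := by
  intro dates_lists _ _
  unfold Spec_compability_price_and_docs_dates
  unfold compability_price_and_docs_dates compability_price_and_docs_dates_alt
  cases dates_lists with
  | nil => rfl
  | cons l0 rest =>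
    rw [altFold2]
    have hmins : (l0 :: rest).foldl
        (fun acc dates_list => acc ++ [(PySem.List.min? dates_list (fun x => x)).getD 0]) []
        = (l0 :: rest).map pvMin := by
      simpa [pvMin] using
        PySem.List.foldl_append_singleton_eq_map (l := l0 :: rest)
          (f := fun dates_list => (PySem.List.min? dates_list (fun x => x)).getD 0) (acc := [])
    have hmaxs : (l0 :: rest).foldl
        (fun acc dates_list => acc ++ [(PySem.List.max? dates_list (fun x => x)).getD 0]) []
        = (l0 :: rest).map pvMax := by
      simpa [pvMax] using
        PySem.List.foldl_append_singleton_eq_map (l := l0 :: rest)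
          (f := fun dates_list => (PySem.List.max? dates_list (fun x => x)).getD 0) (acc := [])
    rw [hmins, hmaxs]
    -- the nested successes loop is a flatMap of decided comparisons
    have hinner : ∀ (mn : Int) (L : List Int) (acc : List Bool),
        L.foldl (fun acc2 mx => if mn < mx then acc2 ++ [true] else acc2 ++ [false]) acc
        = acc ++ L.map (fun mx => decide (mn < mx)) := by
      intro mn L
      induction L with
      | nil => intro acc; simp
      | cons x t ih => intro acc; rw [List.foldl_cons, branch_eq, ih]; simp
    have houter : ∀ (ms : List Int) (acc : List Bool),
        ms.foldl (fun acc mn => ((l0 :: rest).map pvMax).foldl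
          (fun acc2 mx => if mn < mx then acc2 ++ [true] else acc2 ++ [false]) acc) acc
        = acc ++ ms.flatMap (fun mn => ((l0 :: rest).map pvMax).map (fun mx => decide (mn < mx))) := by
      intro ms
      induction ms with
      | nil => intro acc; simp
      | cons m t ih => intro acc; rw [List.foldl_cons, hinner, ih]; simp
    show (if (((l0 :: rest).map pvMin).foldl
        (fun acc mn => ((l0 :: rest).map pvMax).foldl
          (fun acc2 mx => if mn < mx then acc2 ++ [true] else acc2 ++ [false]) acc) []).contains false = true
      then false else true)
      = decide ((rest.map pvMin).foldl max (pvMin l0) < (rest.map pvMax).foldl min (pvMax l0))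
    rw [houter, List.nil_append]
    have hiff := pairwise_iff (pvMin l0) (pvMax l0) (rest.map pvMin) (rest.map pvMax)
    by_cases hall : ∀ mn ∈ (l0 :: rest).map pvMin, ∀ mx ∈ (l0 :: rest).map pvMax, mn < mx
    · have hc : ¬ false ∈ ((l0 :: rest).map pvMin).flatMap
          (fun mn => ((l0 :: rest).map pvMax).map (fun mx => decide (mn < mx))) := by
        intro h
        rw [List.mem_flatMap] at h
        obtain ⟨mn, hmn, h2⟩ := h
        rw [List.mem_map] at h2
        obtain ⟨mx, hmx, heq⟩ := h2
        exact (by simpa using heq : ¬ mn < mx) (hall mn hmn mx hmx)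
      rw [if_neg (by simpa [List.contains_iff_mem] using hc)]
      have hlt := hiff.1 (by simpa using hall)
      simp [hlt]
    · have hc : false ∈ ((l0 :: rest).map pvMin).flatMap
          (fun mn => ((l0 :: rest).map pvMax).map (fun mx => decide (mn < mx))) := by
        push Not at hall
        obtain ⟨mn, hmn, mx, hmx, hnlt⟩ := hall
        rw [List.mem_flatMap]
        exact ⟨mn, hmn, by rw [List.mem_map]; exact ⟨mx, hmx, by simpa using hnlt⟩⟩
      rw [if_pos (by simpa [List.contains_iff_mem] using hc)]
      have hnlt : ¬ (rest.map pvMin).foldl max (pvMin l0) < (rest.map pvMax).foldl min (pvMax l0) := by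
        intro h
        exact hall (by simpa using hiff.2 h)
      simp [hnlt]
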